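-- pv_equiv track=rewrite | github.com/ausaki/data_structures_and_algorithms | leetcode/maximum-non-negative-product-in-a-matrix/399171512.py | maxProductPath
-- ===== SOURCE A (Python) =====
-- from typing import List
--
-- def maxProductPath(grid: List[List[int]]) -> int:
--     m, n = len(grid), len(grid[0])
--     dp = [[0, 0] for i in range(n)]
--     dp[n - 1] = [grid[m - 1][n - 1], grid[m - 1][n - 1]]
--     for j in range(n - 2, -1, -1):
--         a, b = grid[m - 1][j] * dp[j + 1][0], grid[m - 1][j] * dp[j + 1][1]
--         dp[j][:] = min(a, b), max(a, b)
--     for i in range(m - 2, -1, -1):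
--         for j in range(n - 1, -1, -1):
--             a = grid[i][j]
--             if a == 0:
--                 dp[j][:] = 0, 0
--             b = [a * dp[j][0], a * dp[j][1]]
--             if j + 1 < n:
--                 b += [a * dp[j + 1][0], a * dp[j + 1][1]]
--             dp[j][:] = min(b), max(b)
--     result = dp[0][1]
--     return result % (10 ** 9 + 7) if result >= 0 else -1
-- ===== SOURCE B (Python) =====
-- from typing import List
--
-- def maxProductPath(grid: List[List[int]]) -> int:
--     m, n = len(grid), len(grid[0])
--     memo = {}
--
--     def f(i, j):
--         # (min product, max product) over all paths from (i, j) to (m-1, n-1)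
--         if (i, j) in memo:
--             return memo[(i, j)]
--         g = grid[i][j]
--         if i == m - 1 and j == n - 1:
--             res = (g, g)
--         else:
--             cands = []
--             if i + 1 < m:
--                 lo, hi = f(i + 1, j)
--                 cands += [g * lo, g * hi]
--             if j + 1 < n:
--                 lo, hi = f(i, j + 1)
--                 cands += [g * lo, g * hi]
--             res = (min(cands), max(cands))
--         memo[(i, j)] = res
--         return res
--
--     best = f(0, 0)[1]
--     return best % (10 ** 9 + 7) if best >= 0 else -1
-- ===== Notes on version B (the rewrite author's own statement) =====
-- stated objective: alternative
-- what changed: Replaced the in-place bottom-up DP over a mutated single-row array (with its special first-row loop and redundant zero branch) by a top-down memoized recursion f(i,j) returning the (min,max) product pair over paths from (i,j) to the goal.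
import Mathlib
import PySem

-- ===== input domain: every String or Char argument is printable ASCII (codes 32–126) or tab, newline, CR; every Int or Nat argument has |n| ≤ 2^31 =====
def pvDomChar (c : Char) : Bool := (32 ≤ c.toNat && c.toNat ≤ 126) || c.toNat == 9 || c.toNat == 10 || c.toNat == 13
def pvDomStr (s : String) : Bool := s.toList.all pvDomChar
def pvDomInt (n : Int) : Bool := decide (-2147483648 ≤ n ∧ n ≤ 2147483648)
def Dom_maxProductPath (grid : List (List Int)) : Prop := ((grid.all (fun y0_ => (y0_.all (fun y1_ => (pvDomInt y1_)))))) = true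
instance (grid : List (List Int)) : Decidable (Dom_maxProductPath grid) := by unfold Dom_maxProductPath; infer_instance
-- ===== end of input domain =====

-- B differs from A by decomposition: top-down recursion on (i,j) instead of A's in-place
-- bottom-up single-row DP; equivalence of the RETURN value is proved on Pre_ below.
-- (Source B's memo dict only caches the pure recursion's values; the Lean port of B is the
--  recursion itself, uncached, which computes the same values.)

-- ===== PORT A =====
-- grid[i][j] for indices that are in range under Pre_ (exact there; Python would raise out of range)
def pvGetA (grid : List (List Int)) (i j : Nat) : Int := (grid.getD i []).getD j 0

-- 'for j in range(n - 2, -1, -1)' of A's first (bottom-row) loop, as a countdown recursion: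
-- loop1A k dp processes indices k-1, k-2, …, 0 (called with k = n-1).
def loop1A (grid : List (List Int)) (m n : Nat) : Nat → List (Int × Int) → List (Int × Int)
  | 0, dp => dp
  | j + 1, dp =>
      let a := pvGetA grid (m - 1) j * (dp.getD (j + 1) (0, 0)).1
      let b := pvGetA grid (m - 1) j * (dp.getD (j + 1) (0, 0)).2
      loop1A grid m n j (dp.set j (min a b, max a b))

-- body of A's inner loop at column index j (row i)
def cellA (grid : List (List Int)) (n i j : Nat) (dp : List (Int × Int)) : List (Int × Int) :=
  let a := pvGetA grid i j
  let dp1 := if a = 0 then dp.set j (0, 0) else dp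
  let p := dp1.getD j (0, 0)
  let b := [a * p.1, a * p.2] ++
    (if j + 1 < n then
      let q := dp1.getD (j + 1) (0, 0)
      [a * q.1, a * q.2]
    else [])
  dp1.set j (((PySem.List.min? b (fun x => x)).getD 0, (PySem.List.max? b (fun x => x)).getD 0))

-- 'for j in range(n - 1, -1, -1)': loop2A k processes j = k-1, …, 0 (called with k = n)
def loop2A (grid : List (List Int)) (n i : Nat) : Nat → List (Int × Int) → List (Int × Int)
  | 0, dp => dp
  | j + 1, dp => loop2A grid n i j (cellA grid n i j dp)

-- 'for i in range(m - 2, -1, -1)': rowsA k processes i = k-1, …, 0 (called with k = m-1)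
def rowsA (grid : List (List Int)) (m n : Nat) : Nat → List (Int × Int) → List (Int × Int)
  | 0, dp => dp
  | i + 1, dp => rowsA grid m n i (loop2A grid n i n dp)

def maxProductPath (grid : List (List Int)) : Int :=
  let m := grid.length
  let n := (grid.headD []).length
  let dp0 := List.replicate n ((0 : Int), (0 : Int))
  let g := pvGetA grid (m - 1) (n - 1)
  let dp1 := dp0.set (n - 1) (g, g)
  let dp2 := loop1A grid m n (n - 1) dp1
  let dp3 := rowsA grid m n (m - 1) dp2
  let result := (dp3.getD 0 (0, 0)).2
  if result ≥ 0 then PySem.Int.mod result (10 ^ 9 + 7) else -1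

-- ===== PORT B =====
-- grid[i][j] (exact for the in-range indices f visits under Pre_)
def pvCellB (grid : List (List Int)) (i j : Nat) : Int := (grid.getD i []).getD j 0

-- f(i, j) of Source B: (min product, max product) over paths from (i, j) to (m-1, n-1)
def fB (grid : List (List Int)) (m n : Nat) (i j : Nat) : Int × Int :=
  let g := pvCellB grid i j
  if i = m - 1 ∧ j = n - 1 then (g, g)
  else
    let c1 := if _h : i + 1 < m then
        let p := fB grid m n (i + 1) j
        [g * p.1, g * p.2]
      else []
    let c2 := if _h : j + 1 < n then
        let p := fB grid m n i (j + 1)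
        [g * p.1, g * p.2]
      else []
    let c := c1 ++ c2
    ((PySem.List.min? c (fun x => x)).getD 0, (PySem.List.max? c (fun x => x)).getD 0)
termination_by (m - i) + (n - j)
decreasing_by all_goals omega

def maxProductPath_alt (grid : List (List Int)) : Int :=
  let m := grid.length
  let n := (grid.headD []).length
  let best := (fB grid m n 0 0).2
  if best ≥ 0 then PySem.Int.mod best (10 ^ 9 + 7) else -1

-- ===== PRECONDITION & SPEC =====
-- Pre_ excludes exactly the inputs on which Python A raises IndexError: an empty grid, an
-- empty first row, or a row shorter than the first row (A reads grid[i][j] for all j < len(grid[0])).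
def Pre_maxProductPath (grid : List (List Int)) : Prop :=
  0 < grid.length ∧ 0 < (grid.headD []).length ∧
    ∀ row ∈ grid, (grid.headD []).length ≤ row.length
instance (grid : List (List Int)) : Decidable (Pre_maxProductPath grid) := by
  unfold Pre_maxProductPath; infer_instance

def pvWitness_maxProductPath : List (List Int) := [[-1, -2, 1], [1, -2, 1], [3, -4, 1]]

def Spec_maxProductPath (grid : List (List Int)) (out : Int) : Prop := out = maxProductPath_alt grid
instance (grid : List (List Int)) (out : Int) : Decidable (Spec_maxProductPath grid out) := by
  unfold Spec_maxProductPath; infer_instance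

-- ===== CLAIM (what is proved, stated in full; the proofs are below) =====
def Claim_equal_maxProductPath : Prop := ∀ (grid : List (List Int)), Dom_maxProductPath grid → Pre_maxProductPath grid → Spec_maxProductPath grid (maxProductPath grid)

-- ===== LEMMAS AND PROOFS =====

theorem min2_eval (x y : Int) : (PySem.List.min? [x, y] (fun v => v)).getD 0 = min x y := by
  simp [PySem.List.min?_id_cons, List.foldl]

theorem max2_eval (x y : Int) : (PySem.List.max? [x, y] (fun v => v)).getD 0 = max x y := by
  simp [PySem.List.max?_id_cons, List.foldl]

theorem length_cellA (grid : List (List Int)) (n i j : Nat) (dp : List (Int × Int)) :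
    (cellA grid n i j dp).length = dp.length := by
  unfold cellA
  by_cases h0 : pvGetA grid i j = 0 <;> simp [h0]

theorem length_loop2A (grid : List (List Int)) (n i : Nat) :
    ∀ (k : Nat) (dp : List (Int × Int)), (loop2A grid n i k dp).length = dp.length := by
  intro k
  induction k with
  | zero => intro dp; rfl
  | succ j ih => intro dp; simp [loop2A, ih, length_cellA]

theorem getD_set_self (dp : List (Int × Int)) (j : Nat) (x : Int × Int) (h : j < dp.length) :
    (dp.set j x).getD j (0, 0) = x := by
  simp [List.getD, h]

theorem getD_set_ne (dp : List (Int × Int)) (j j' : Nat) (x : Int × Int) (h : j ≠ j') :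
    (dp.set j x).getD j' (0, 0) = dp.getD j' (0, 0) := by
  simp [List.getD, List.getElem?_set_ne h]

theorem min4_eval (w x y z : Int) :
    (PySem.List.min? [w, x, y, z] (fun v => v)).getD 0 = min (min (min w x) y) z := by
  simp [PySem.List.min?_id_cons, List.foldl]

theorem max4_eval (w x y z : Int) :
    (PySem.List.max? [w, x, y, z] (fun v => v)).getD 0 = max (max (max w x) y) z := by
  simp [PySem.List.max?_id_cons, List.foldl]

theorem pvCellB_eq (grid : List (List Int)) (i j : Nat) : pvCellB grid i j = pvGetA grid i j := rfl

theorem length_loop1A (grid : List (List Int)) (m n : Nat) :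
    ∀ (k : Nat) (dp : List (Int × Int)), (loop1A grid m n k dp).length = dp.length := by
  intro k
  induction k with
  | zero => intro dp; rfl
  | succ j ih => intro dp; simp [loop1A, ih]

theorem fB_corner (grid : List (List Int)) (m n : Nat) :
    fB grid m n (m - 1) (n - 1) = (pvCellB grid (m - 1) (n - 1), pvCellB grid (m - 1) (n - 1)) := by
  rw [fB]; simp

theorem fB_bottom (grid : List (List Int)) (m n k : Nat) (hk : k + 1 < n) :
    fB grid m n (m - 1) k =
      (min (pvCellB grid (m - 1) k * (fB grid m n (m - 1) (k + 1)).1)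
           (pvCellB grid (m - 1) k * (fB grid m n (m - 1) (k + 1)).2),
       max (pvCellB grid (m - 1) k * (fB grid m n (m - 1) (k + 1)).1)
           (pvCellB grid (m - 1) k * (fB grid m n (m - 1) (k + 1)).2)) := by
  have h1 : k ≠ n - 1 := by omega
  have h2 : ¬(m - 1 + 1 < m) := by omega
  rw [fB]
  simp [h1, h2, hk, min2_eval, max2_eval]

theorem fB_inner (grid : List (List Int)) (m n i j : Nat) (hi : i + 1 < m) (hj : j + 1 < n) :
    fB grid m n i j =
      (min (min (min (pvCellB grid i j * (fB grid m n (i + 1) j).1)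
                     (pvCellB grid i j * (fB grid m n (i + 1) j).2))
                (pvCellB grid i j * (fB grid m n i (j + 1)).1))
           (pvCellB grid i j * (fB grid m n i (j + 1)).2),
       max (max (max (pvCellB grid i j * (fB grid m n (i + 1) j).1)
                     (pvCellB grid i j * (fB grid m n (i + 1) j).2))
                (pvCellB grid i j * (fB grid m n i (j + 1)).1))
           (pvCellB grid i j * (fB grid m n i (j + 1)).2)) := by
  have h1 : ¬(i = m - 1 ∧ j = n - 1) := by omega
  rw [fB]
  simp [h1, hi, hj, min4_eval, max4_eval]

theorem fB_lastcol (grid : List (List Int)) (m n i j : Nat) (hi : i + 1 < m) (hj : ¬(j + 1 < n)) :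
    fB grid m n i j =
      (min (pvCellB grid i j * (fB grid m n (i + 1) j).1)
           (pvCellB grid i j * (fB grid m n (i + 1) j).2),
       max (pvCellB grid i j * (fB grid m n (i + 1) j).1)
           (pvCellB grid i j * (fB grid m n (i + 1) j).2)) := by
  have h1 : ¬(i = m - 1 ∧ j = n - 1) := by omega
  rw [fB]
  simp [h1, hi, hj, min2_eval, max2_eval]

-- bottom-row invariant: after loop1A k, every slot j < n holds fB (m-1) j,
-- provided slots k … n-1 already do
theorem loop1A_inv (grid : List (List Int)) (m n : Nat) :
    ∀ (k : Nat) (dp : List (Int × Int)), dp.length = n → k < n →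
      (∀ j, k ≤ j → j < n → dp.getD j (0, 0) = fB grid m n (m - 1) j) →
      ∀ j, j < n → (loop1A grid m n k dp).getD j (0, 0) = fB grid m n (m - 1) j := by
  intro k
  induction k with
  | zero =>
      intro dp _ _ hinv j hj
      exact hinv j (Nat.zero_le j) hj
  | succ k ih =>
      intro dp hlen hk hinv j hj
      have hk1 : k + 1 < n := hk
      have hdpk1 : dp.getD (k + 1) (0, 0) = fB grid m n (m - 1) (k + 1) :=
        hinv (k + 1) (Nat.le_refl _) hk1
      rw [loop1A]
      apply ih
      · simp [hlen]
      · omega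
      · intro j' hj' hj'n
        rcases Nat.eq_or_lt_of_le hj' with he | hl
        · rw [← he, getD_set_self _ _ _ (by omega), hdpk1, fB_bottom grid m n k hk1, pvCellB_eq]
        · rw [getD_set_ne _ _ _ _ (by omega)]
          exact hinv j' (by omega) hj'n
      · exact hj

theorem cellA_eq (grid : List (List Int)) (m n i k : Nat) (dp : List (Int × Int))
    (hlen : dp.length = n) (hi : i + 1 < m) (hk : k < n)
    (hold : dp.getD k (0, 0) = fB grid m n (i + 1) k)
    (hnew : k + 1 < n → dp.getD (k + 1) (0, 0) = fB grid m n i (k + 1)) :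
    cellA grid n i k dp = dp.set k (fB grid m n i k) := by
  have hold2 : dp[k]?.getD ((0 : Int), (0 : Int)) = fB grid m n (i + 1) k := by
    simpa [List.getD] using hold
  have hnew2 : k + 1 < n → dp[k + 1]?.getD ((0 : Int), (0 : Int)) = fB grid m n i (k + 1) := by
    intro h; simpa [List.getD] using hnew h
  unfold cellA
  by_cases ha : pvGetA grid i k = 0
  · -- a == 0: every candidate product is 0, f i k is (0,0) too
    by_cases hj : k + 1 < n
    · rw [fB_inner grid m n i k hi hj, pvCellB_eq]
      simp [ha, hj, min4_eval, max4_eval, List.set_set]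
    · rw [fB_lastcol grid m n i k hi hj, pvCellB_eq]
      simp [ha, hj, min2_eval, max2_eval, List.set_set]
  · by_cases hj : k + 1 < n
    · rw [fB_inner grid m n i k hi hj, pvCellB_eq]
      simp [ha, hj, min4_eval, max4_eval, hold2, hnew2 hj]
    · rw [fB_lastcol grid m n i k hi hj, pvCellB_eq]
      simp [ha, hj, min2_eval, max2_eval, hold2]

-- row-step invariant for the inner loop: slots below k hold the old row (i+1),
-- slots ≥ k hold the new row i; afterwards all slots hold row i
theorem loop2A_inv (grid : List (List Int)) (m n i : Nat) (him : i + 1 < m) :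
    ∀ (k : Nat) (dp : List (Int × Int)), dp.length = n → k ≤ n →
      (∀ j, j < k → dp.getD j (0, 0) = fB grid m n (i + 1) j) →
      (∀ j, k ≤ j → j < n → dp.getD j (0, 0) = fB grid m n i j) →
      ∀ j, j < n → (loop2A grid n i k dp).getD j (0, 0) = fB grid m n i j := by
  intro k
  induction k with
  | zero =>
      intro dp _ _ _ hnew j hj
      exact hnew j (Nat.zero_le j) hj
  | succ k ih =>
      intro dp hlen hk hold hnew j hj
      rw [loop2A, cellA_eq grid m n i k dp hlen him (by omega) (hold k (by omega))
        (fun h => hnew (k + 1) (Nat.le_refl _) h)]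
      apply ih
      · simp [hlen]
      · omega
      · intro j' hj'
        rw [getD_set_ne _ _ _ _ (by omega)]
        exact hold j' (by omega)
      · intro j' hj' hj'n
        rcases Nat.eq_or_lt_of_le hj' with he | hl
        · subst he
          exact getD_set_self _ _ _ (by omega)
        · rw [getD_set_ne _ _ _ _ (by omega)]
          exact hnew j' (by omega) hj'n
      · exact hj

theorem rowsA_inv (grid : List (List Int)) (m n : Nat) :
    ∀ (k : Nat) (dp : List (Int × Int)), dp.length = n → k ≤ m - 1 →
      (∀ j, j < n → dp.getD j (0, 0) = fB grid m n k j) →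
      ∀ j, j < n → (rowsA grid m n k dp).getD j (0, 0) = fB grid m n 0 j := by
  intro k
  induction k with
  | zero => intro dp _ _ hinv j hj; exact hinv j hj
  | succ k ih =>
      intro dp hlen hk hinv j hj
      rw [rowsA]
      apply ih
      · rw [length_loop2A, hlen]
      · omega
      · intro j' hj'
        exact loop2A_inv grid m n k (by omega) n dp hlen (Nat.le_refl _)
          (fun j'' hj'' => hinv j'' hj'') (fun j'' h1 h2 => absurd h2 (by omega)) j' hj'
      · exact hj

theorem final_key (grid : List (List Int)) (hm : 0 < grid.length)
    (hn : 0 < (grid.headD []).length) :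
    (rowsA grid grid.length (grid.headD []).length (grid.length - 1)
      (loop1A grid grid.length (grid.headD []).length ((grid.headD []).length - 1)
        ((List.replicate (grid.headD []).length ((0 : Int), (0 : Int))).set
          ((grid.headD []).length - 1)
          (pvGetA grid (grid.length - 1) ((grid.headD []).length - 1),
           pvGetA grid (grid.length - 1) ((grid.headD []).length - 1))))).getD 0 (0, 0)
      = fB grid grid.length (grid.headD []).length 0 0 := by
  generalize hg1 : (grid.headD []).length = n at hn ⊢
  generalize hg2 : grid.length = m at hm ⊢
  apply rowsA_inv grid m n (m - 1) _ ?hlen (Nat.le_refl _) ?hinv 0 hn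
  case hlen => rw [length_loop1A]; simp
  case hinv =>
    apply loop1A_inv grid m n (n - 1) _ (by simp) (by omega)
    intro j h1 h2
    have hje : j = n - 1 := by omega
    subst hje
    rw [getD_set_self _ _ _ (by simp; omega), fB_corner, pvCellB_eq]

-- ===== VERDICT (by name: the statement is the Claim_ definition above) =====
theorem maxProductPath_spec : Claim_equal_maxProductPath := by
  intro grid _ hpre
  obtain ⟨hm, hn, -⟩ := hpre
  simp only [Spec_maxProductPath, maxProductPath, maxProductPath_alt]
  rw [final_key grid hm hn]
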